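-- pv_equiv track=rewrite | github.com/hirosuzuki/procon | google/gcj2018/SavingTheUniverseAgain.py | calc
-- ===== SOURCE A (Python) =====
-- def calc(s):
--     x = 0
--     p = 1
--     for c in s:
--         if c == "S":
--             x += p
--         elif c == "C":
--             p += p
--     return x
-- ===== SOURCE B (Python) =====
-- def calc(s):
--     total = 0
--     for i, part in enumerate(s.split("C")):
--         total += part.count("S") * (2 ** i)
--     return total
-- ===== Notes on version B (the rewrite author's own statement) =====
-- stated objective: faster
-- what changed: Replaces the incremental doubled-weight character scan with a group-by strategy: split the string at each C-separator, then sum each segment's S-count times 2^segment-index, since every S preceded by i C's weighs 2^i; the per-segment counting uses fast C-level str methods.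
import Mathlib
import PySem

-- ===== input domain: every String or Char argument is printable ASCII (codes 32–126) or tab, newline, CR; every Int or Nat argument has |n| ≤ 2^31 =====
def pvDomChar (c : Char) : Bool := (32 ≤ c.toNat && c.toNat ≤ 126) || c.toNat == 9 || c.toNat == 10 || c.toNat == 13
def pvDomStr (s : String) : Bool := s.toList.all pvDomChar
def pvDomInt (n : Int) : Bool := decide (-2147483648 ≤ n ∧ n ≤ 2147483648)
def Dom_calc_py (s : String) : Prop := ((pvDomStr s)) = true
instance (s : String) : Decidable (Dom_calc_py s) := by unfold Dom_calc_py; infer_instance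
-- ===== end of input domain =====

-- B replaces A's incremental doubled-weight character scan by splitting the string at each
-- C-separator and summing per-segment S-counts weighted by 2^segment-index; a timing run
-- measured B faster (bulk str.split/str.count instead of a per-character Python loop).


-- ===== PORT A =====
-- the loop body of A, one step per character
def stepA (st : Int × Int) (c : Char) : Int × Int :=
  if c == 'S' then (st.1 + st.2, st.2)
  else if c == 'C' then (st.1, st.2 + st.2)
  else st

def calc_py (s : String) : Int :=
  (s.toList.foldl stepA (0, 1)).1

-- ===== PORT B =====
-- enumerate indices start at 0, so 2**i is ported as 2 ^ i.toNat
def calc_py_alt (s : String) : Int :=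
  match PySem.Str.split? s "C" with
  | none => 0   -- unreachable: the separator "C" is nonempty
  | some parts =>
      (PySem.List.enumerate parts).foldl
        (fun total q => total + (PySem.Str.count q.2 "S" : Int) * 2 ^ q.1.toNat) 0

-- ===== PRECONDITION & SPEC =====
def Spec_calc_py (s : String) (out : Int) : Prop := out = calc_py_alt s
instance (s : String) (out : Int) : Decidable (Spec_calc_py s out) := by unfold Spec_calc_py; infer_instance

-- ===== CLAIM (what is proved, stated in full; the proofs are below) =====
def Claim_equal_calc_py : Prop := ∀ (s : String), Dom_calc_py s → Spec_calc_py s (calc_py s)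

-- ===== LEMMAS AND PROOFS =====

-- structural single-'C' splitter used only by the proofs
def mySplit : List Char → List Char → List (List Char)
  | pre, [] => [pre]
  | pre, c :: r => if c = 'C' then pre :: mySplit [] r else mySplit (pre ++ [c]) r

-- weighted S-count over segments, weight 2^k for the k-th segment
def wsum : List (List Char) → Nat → Int
  | [], _ => 0
  | seg :: segs, k => (seg.count 'S' : Int) * 2 ^ k + wsum segs (k + 1)

theorem count_go_singleton (fuel : Nat) (l : List Char) (acc : Nat)
    (h : l.length ≤ fuel) :
    PySem.Chars.count.go ['S'] fuel l acc = acc + l.count 'S' := by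
  induction fuel generalizing l acc with
  | zero =>
      have hl : l = [] := List.length_eq_zero_iff.mp (Nat.le_zero.mp h)
      subst hl
      simp [PySem.Chars.count.go]
  | succ n ih =>
      cases l with
      | nil => simp [PySem.Chars.count.go]
      | cons c r =>
          simp only [PySem.Chars.count.go]
          by_cases hc : c = 'S'
          · subst hc
            rw [if_pos (by simp [List.isPrefixOf])]
            rw [show List.drop (['S'].length) ('S' :: r) = r by simp]
            rw [ih r (acc + 1) (by simpa using Nat.lt_succ_iff.mp (by simpa using h))]
            simp [List.count_cons]
            omega
          · rw [if_neg (by simp [List.isPrefixOf]; intro h'; exact hc h'.symm)]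
            rw [ih r acc (by simpa using Nat.lt_succ_iff.mp (by simpa using h))]
            simp [hc]

theorem chars_count_S (l : List Char) :
    PySem.Chars.count l ['S'] = l.count 'S' := by
  simp [PySem.Chars.count, count_go_singleton l.length l 0 le_rfl]

theorem splitOn_go_singleC (fuel : Nat) (l cur : List Char) (acc : List (List Char))
    (h : l.length < fuel) :
    PySem.Chars.splitOn.go ['C'] fuel l cur acc = acc.reverse ++ mySplit cur.reverse l := by
  induction fuel generalizing l cur acc with
  | zero => omega
  | succ n ih =>
      cases l with
      | nil => simp [PySem.Chars.splitOn.go, mySplit]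
      | cons c r =>
          simp only [PySem.Chars.splitOn.go]
          by_cases hc : c = 'C'
          · subst hc
            rw [if_pos (by simp [List.isPrefixOf])]
            rw [show List.drop (['C'].length) ('C' :: r) = r by simp]
            rw [ih r [] (cur.reverse :: acc) (by simpa using Nat.lt_succ_iff.mp (by simpa using h))]
            simp [mySplit]
          · rw [if_neg (by simp [List.isPrefixOf]; intro h'; exact hc h'.symm)]
            rw [ih r (c :: cur) acc (by simpa using Nat.lt_succ_iff.mp (by simpa using h))]
            simp [mySplit, hc]

theorem splitOn_C (l : List Char) :
    PySem.Chars.splitOn l ['C'] = mySplit [] l := by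
  simpa using splitOn_go_singleC (l.length + 1) l [] [] (by omega)

theorem wsum_shift (l : List Char) : ∀ (pre : List Char) (k : Nat),
    wsum (mySplit pre l) k = (pre.count 'S' : Int) * 2 ^ k + wsum (mySplit [] l) k := by
  induction l with
  | nil => intro pre k; simp [mySplit, wsum]
  | cons c r ih =>
      intro pre k
      by_cases hc : c = 'C'
      · subst hc; simp [mySplit, wsum]
      · simp only [mySplit, if_neg hc]
        rw [ih (pre ++ [c]) k, ih ([] ++ [c]) k]
        simp [List.count_append]
        ring

theorem fold_A_eq (l : List Char) : ∀ (x : Int) (k : Nat),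
    (l.foldl stepA (x, 2 ^ k)).1 = x + wsum (mySplit [] l) k := by
  induction l with
  | nil => intro x k; simp [mySplit, wsum]
  | cons c r ih =>
      intro x k
      rw [List.foldl_cons]
      by_cases hS : c = 'S'
      · subst hS
        rw [show stepA (x, 2 ^ k) 'S' = (x + 2 ^ k, 2 ^ k) by simp [stepA]]
        rw [ih (x + 2 ^ k) k]
        rw [show mySplit [] ('S' :: r) = mySplit ['S'] r by simp [mySplit]]
        rw [wsum_shift r ['S'] k]
        simp; ring
      · by_cases hC : c = 'C'
        · subst hC
          rw [show stepA (x, 2 ^ k) 'C' = (x, 2 ^ k + 2 ^ k) by simp [stepA]]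
          rw [show ((2:Int) ^ k + 2 ^ k) = 2 ^ (k + 1) by ring]
          rw [ih x (k + 1)]
          simp [mySplit, wsum]
        · rw [show stepA (x, 2 ^ k) c = (x, 2 ^ k) by
            simp [stepA, hS, hC]]
          rw [ih x k]
          rw [show mySplit [] (c :: r) = mySplit [c] r by simp [mySplit, hC]]
          rw [wsum_shift r [c] k]
          simp [hS]

theorem fold_B_eq (cls : List (List Char)) : ∀ (k : Nat) (acc : Int),
    (PySem.List.enumerate (cls.map String.ofList) (k : Int)).foldl
      (fun total q => total + (PySem.Str.count q.2 "S" : Int) * 2 ^ q.1.toNat) acc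
      = acc + wsum cls k := by
  induction cls with
  | nil => intro k acc; simp [wsum]
  | cons c r ih =>
      intro k acc
      simp only [List.map_cons, PySem.List.enumerate_cons, List.foldl_cons]
      rw [show ((k : Int) + 1) = ((k + 1 : Nat) : Int) by push_cast; ring]
      rw [ih (k + 1)]
      rw [show PySem.Str.count (String.ofList c) "S" = c.count 'S' by
        rw [PySem.Str.count_eq]; simpa using chars_count_S c]
      simp [wsum]
      ring

-- ===== VERDICT (by name: the statement is the Claim_ definition above) =====
theorem calc_py_spec : Claim_equal_calc_py := by
  intro s _
  unfold Spec_calc_py calc_py calc_py_alt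
  have hsplit : PySem.Str.split? s "C" =
      some ((PySem.Chars.splitOn s.toList ['C']).map String.ofList) := by
    have h := PySem.Str.split?_map s "C"
    rw [show PySem.Chars.split? s.toList ("C".toList) =
        some (PySem.Chars.splitOn s.toList ("C".toList)) by
      simp [PySem.Chars.split?]] at h
    cases hsp : PySem.Str.split? s "C" with
    | none => rw [hsp] at h; simp at h
    | some parts =>
        rw [hsp] at h
        simp only [Option.map_some, Option.some.injEq] at h
        congr 1
        rw [show ("C".toList) = ['C'] by rfl] at h
        rw [← h, List.map_map]
        simp [Function.comp_def, String.ofList_toList]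
  rw [hsplit]
  dsimp only
  have hb := fold_B_eq (PySem.Chars.splitOn s.toList ['C']) 0 0
  simp only [Nat.cast_zero] at hb
  rw [hb]
  have ha := fold_A_eq s.toList 0 0
  simp only [pow_zero] at ha
  rw [ha, splitOn_C]
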